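-- pv_equiv track=rewrite | github.com/PanchoManera/dec-image-extractor | ods1_complete_extractor.py | parse_radix50
-- ===== SOURCE A (Python) =====
-- def parse_radix50(word):
--     """Convert 16-bit word from RADIX-50 encoding to ASCII string."""
--     if word == 0:
--         return '   '
--
--     chars = []
--     for i in range(3):
--         char_code = word % 40
--         word //= 40
--
--         if char_code == 0:
--             chars.append(' ')
--         elif 1 <= char_code <= 26:
--             chars.append(chr(ord('A') + char_code - 1))
--         elif 27 <= char_code <= 36:
--             chars.append(chr(ord('0') + char_code - 27))
--         elif char_code == 37:
--             chars.append('$')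
--         elif char_code == 38:
--             chars.append('.')
--         else:
--             chars.append(' ')
--
--     return ''.join(reversed(chars))
-- ===== SOURCE B (Python) =====
-- _RADIX50 = ' ABCDEFGHIJKLMNOPQRSTUVWXYZ0123456789$. '
--
-- def parse_radix50(word):
--     """Convert 16-bit word from RADIX-50 encoding to ASCII string."""
--     return (_RADIX50[(word // 1600) % 40]
--             + _RADIX50[(word // 40) % 40]
--             + _RADIX50[word % 40])
-- ===== Notes on version B (the rewrite author's own statement) =====
-- stated objective: idiomatic
-- what changed: Replaces the loop with an append-and-reverse accumulator and the six-way if/elif classification chain by a single precomputed 40-character RADIX-50 table indexed at the three base-40 digits, and drops the word==0 special case since the table already yields three spaces.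
import Mathlib
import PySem

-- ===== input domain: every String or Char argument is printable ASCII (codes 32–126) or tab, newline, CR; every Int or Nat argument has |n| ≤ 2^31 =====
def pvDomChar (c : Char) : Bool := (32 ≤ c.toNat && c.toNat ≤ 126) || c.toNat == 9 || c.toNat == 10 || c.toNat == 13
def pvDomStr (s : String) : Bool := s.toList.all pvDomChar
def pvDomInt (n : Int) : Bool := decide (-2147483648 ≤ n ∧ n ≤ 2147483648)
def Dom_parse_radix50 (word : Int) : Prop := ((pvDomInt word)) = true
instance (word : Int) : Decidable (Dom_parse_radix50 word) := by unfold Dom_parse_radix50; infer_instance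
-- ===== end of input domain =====

-- B replaces A's loop and if/elif classification chain by one precomputed 40-char
-- RADIX-50 table indexed at the three base-40 digits (idiomatic; same cost).

-- ===== PORT A =====
-- body of the if/elif chain inside A's loop
def pvClassify (char_code : Int) : Char :=
  if char_code = 0 then ' '
  else if 1 ≤ char_code ∧ char_code ≤ 26 then Char.ofNat (65 + (char_code - 1).toNat)
  else if 27 ≤ char_code ∧ char_code ≤ 36 then Char.ofNat (48 + (char_code - 27).toNat)
  else if char_code = 37 then '$'
  else if char_code = 38 then '.'
  else ' '

def parse_radix50 (word : Int) : String :=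
  if word = 0 then "   "
  else
    let st := (PySem.List.pyRange 0 3 1).foldl
      (fun (p : Int × List Char) _ =>
        let char_code := PySem.Int.mod p.1 40
        let w := PySem.Int.floordiv p.1 40
        (w, p.2 ++ [pvClassify char_code]))
      (word, [])
    String.ofList st.2.reverse

-- ===== PORT B =====
def pvRADIX50 : List Char := " ABCDEFGHIJKLMNOPQRSTUVWXYZ0123456789$. ".toList

def parse_radix50_alt (word : Int) : String :=
  String.ofList
    [ pvRADIX50.getD (PySem.Int.mod (PySem.Int.floordiv word 1600) 40).toNat ' '
    , pvRADIX50.getD (PySem.Int.mod (PySem.Int.floordiv word 40) 40).toNat ' '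
    , pvRADIX50.getD (PySem.Int.mod word 40).toNat ' ' ]

-- ===== PRECONDITION & SPEC =====
def Spec_parse_radix50 (word : Int) (out : String) : Prop := out = parse_radix50_alt word
instance (word : Int) (out : String) : Decidable (Spec_parse_radix50 word out) := by unfold Spec_parse_radix50; infer_instance

-- ===== CLAIM (what is proved, stated in full; the proofs are below) =====
def Claim_equal_parse_radix50 : Prop := ∀ (word : Int), Dom_parse_radix50 word → Spec_parse_radix50 word (parse_radix50 word)

-- ===== LEMMAS AND PROOFS =====

-- the if/elif chain agrees with the table on every base-40 digit
lemma pvClassify_eq_table (d : Int) (h0 : 0 ≤ d) (h1 : d < 40) :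
    pvClassify d = pvRADIX50.getD d.toNat ' ' := by
  interval_cases d <;> decide

lemma pv_floordiv_floordiv (a : Int) :
    PySem.Int.floordiv (PySem.Int.floordiv a 40) 40 = PySem.Int.floordiv a 1600 := by
  have h1 := PySem.Int.floordiv_mul_add_mod a 40
  have h2 := PySem.Int.floordiv_mul_add_mod (PySem.Int.floordiv a 40) 40
  have h3 := PySem.Int.floordiv_mul_add_mod a 1600
  have m1 := PySem.Int.mod_nonneg a (b := 40) (by norm_num)
  have m1' := PySem.Int.mod_lt a (b := 40) (by norm_num)
  have m2 := PySem.Int.mod_nonneg (PySem.Int.floordiv a 40) (b := 40) (by norm_num)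
  have m2' := PySem.Int.mod_lt (PySem.Int.floordiv a 40) (b := 40) (by norm_num)
  have m3 := PySem.Int.mod_nonneg a (b := 1600) (by norm_num)
  have m3' := PySem.Int.mod_lt a (b := 1600) (by norm_num)
  omega

-- ===== VERDICT (by name: the statement is the Claim_ definition above) =====
theorem parse_radix50_spec : Claim_equal_parse_radix50 := by
  intro word _
  unfold Spec_parse_radix50 parse_radix50 parse_radix50_alt
  by_cases hz : word = 0
  · subst hz; decide
  · simp only [if_neg hz]
    have hr : PySem.List.pyRange 0 3 1 = [0, 1, 2] := by decide
    have hc : ∀ w : Int, pvClassify (PySem.Int.mod w 40)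
        = pvRADIX50.getD (PySem.Int.mod w 40).toNat ' ' := fun w =>
      pvClassify_eq_table _ (PySem.Int.mod_nonneg _ (by norm_num)) (PySem.Int.mod_lt _ (by norm_num))
    rw [hr]
    simp only [List.foldl, List.nil_append, List.singleton_append, String.ofList_inj,
      pv_floordiv_floordiv, hc]
    simp
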